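-- pv_equiv track=rewrite | github.com/miliar/Code_Jam_Webscraper | solutions_python/Problem_199/3245.py | get_all_flips
-- ===== SOURCE A (Python) =====
-- def get_all_flips(stack,K):
--     flips = []
--     for i in range(0,len(stack) - K+1):
--         for j in range(i, i+K):
--             stack[j] = '+' if stack[j] == '-' else '-'
--
--         flips.append(list(stack))
--         for j in range(i,i+K):
--             stack[j] = '+' if stack[j] == '-' else '-'
--
--     return flips
-- ===== SOURCE B (Python) =====
-- def get_all_flips(stack, K):
--     n = len(stack)
--     if n - K + 1 <= 0:
--         return []
--     cur = ['+' if c == '-' else '-' for c in stack[:K]] + stack[K:]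
--     res = [list(cur)]
--     for i in range(1, n - K + 1):
--         cur[i - 1] = '+' if cur[i - 1] == '-' else '-'
--         cur[i + K - 1] = '+' if cur[i + K - 1] == '-' else '-'
--         res.append(list(cur))
--     return res
-- ===== Notes on version B (the rewrite author's own statement) =====
-- stated objective: alternative
-- what changed: A re-flips the whole K-window twice per position (flip, snapshot, flip back to revert, on the mutated list); B slides the window: it flips the first window once and then per step re-flips only the two boundary positions of its working copy, appending a copy each time; Pre_ excludes non-positive K, outside the natural domain of a window size, where A's loop degenerates to copying the untouched list while B's boundary updates touch a vacuous window.
-- outside the precondition, e.g. on get_all_flips(['+'], -1): A returns [['+'], ['+'], ['+']], B raises IndexError; on get_all_flips(['x'], 0): A returns [['x'], ['x']], B returns [['x'], ['+']]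
import Mathlib
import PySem

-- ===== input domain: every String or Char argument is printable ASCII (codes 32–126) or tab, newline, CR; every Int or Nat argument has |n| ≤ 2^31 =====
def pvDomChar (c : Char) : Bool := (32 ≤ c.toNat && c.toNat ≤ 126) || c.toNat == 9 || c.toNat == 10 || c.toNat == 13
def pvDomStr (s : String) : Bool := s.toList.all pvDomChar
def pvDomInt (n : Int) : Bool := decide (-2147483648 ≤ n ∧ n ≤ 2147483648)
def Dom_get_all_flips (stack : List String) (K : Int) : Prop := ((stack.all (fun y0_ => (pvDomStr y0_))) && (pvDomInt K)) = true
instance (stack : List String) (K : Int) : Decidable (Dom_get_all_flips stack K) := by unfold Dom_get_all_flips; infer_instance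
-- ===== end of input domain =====

-- B replaces A's flip-whole-window/snapshot/revert passes by a sliding window that re-flips only
-- the two boundary positions per step (objective: alternative). Equivalence is about the RETURN
-- value only: A mutates its argument in place, B does not.

-- ===== PORT A =====
def pvFlip (s : String) : String := if s == "-" then "+" else "-"

-- A's inner pass: for j in range(i, i+K): stack[j] = '+' if stack[j] == '-' else '-'
def pvInnerA (st : List String) (i K : Int) : List String :=
  (PySem.List.pyRange i (i + K) 1).foldl
    (fun st j => PySem.List.pySetD st j (pvFlip (PySem.List.pyGetD st j ""))) st

def get_all_flips (stack : List String) (K : Int) : List (List String) :=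
  ((PySem.List.pyRange 0 ((stack.length : Int) - K + 1) 1).foldl
    (fun (acc : List (List String) × List String) i =>
      let st1 := pvInnerA acc.2 i K
      (acc.1 ++ [st1], pvInnerA st1 i K)) ([], stack)).1

-- ===== PORT B =====
def get_all_flips_alt (stack : List String) (K : Int) : List (List String) :=
  if (stack.length : Int) - K + 1 ≤ 0 then []
  else
    let cur := (PySem.List.slice stack none (some K)).map
                 (fun c => if c == "-" then "+" else "-")
               ++ PySem.List.slice stack (some K) none
    ((PySem.List.pyRange 1 ((stack.length : Int) - K + 1) 1).foldl
      (fun (acc : List (List String) × List String) i =>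
        let c1 := PySem.List.pySetD acc.2 (i - 1)
          (if (PySem.List.pyGetD acc.2 (i - 1) "") == "-" then "+" else "-")
        let c2 := PySem.List.pySetD c1 (i + K - 1)
          (if (PySem.List.pyGetD c1 (i + K - 1) "") == "-" then "+" else "-")
        (acc.1 ++ [c2], c2)) ([cur], cur)).1

-- ===== PRECONDITION & SPEC =====
-- Pre_ excludes non-positive K, outside the natural domain of a window size: there A's inner
-- loops are vacuous and it degenerates to copying the untouched list len(stack)+|K|+1 times,
-- while B's sliding boundary updates have no meaningful window to slide (for K < 0 they index
-- out of range and raise, for K = 0 the two updates hit the same position).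
def Pre_get_all_flips (stack : List String) (K : Int) : Prop := 1 ≤ K
instance (stack : List String) (K : Int) : Decidable (Pre_get_all_flips stack K) := by unfold Pre_get_all_flips; infer_instance
def pvWitness_get_all_flips : List String × Int := (["+", "-"], 1)

def Spec_get_all_flips (stack : List String) (K : Int) (out : List (List String)) : Prop := out = get_all_flips_alt stack K
instance (stack : List String) (K : Int) (out : List (List String)) : Decidable (Spec_get_all_flips stack K out) := by unfold Spec_get_all_flips; infer_instance

-- ===== CLAIM (what is proved, stated in full; the proofs are below) =====
def Claim_equal_get_all_flips : Prop := ∀ (stack : List String) (K : Int), Dom_get_all_flips stack K → Pre_get_all_flips stack K → Spec_get_all_flips stack K (get_all_flips stack K)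

-- ===== LEMMAS AND PROOFS =====

def pvNorm (s : String) : String := if s == "-" then "-" else "+"

-- A's snapshot for window start i (already-processed prefix normalized by flip+revert), as a mapIdx
def pvSnapA (stack : List String) (K i : Int) : List String :=
  stack.mapIdx (fun j c =>
    if i ≤ (j : Int) ∧ (j : Int) < i + K then pvFlip c
    else if (j : Int) < i ∧ 0 < K then pvNorm c
    else c)

-- A's live stack at the start of outer iteration i (for 0 < K)
def pvStateA (stack : List String) (K i : Int) : List String :=
  stack.mapIdx (fun j c => if (j : Int) < i + K - 1 ∧ 1 ≤ i then pvNorm c else c)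

theorem pvFlip_flip (c : String) : pvFlip (pvFlip c) = pvNorm c := by
  by_cases h : c = "-" <;> simp [pvFlip, pvNorm, h]

theorem pvFlip_norm (c : String) : pvFlip (pvNorm c) = pvFlip c := by
  by_cases h : c = "-" <;> simp [pvFlip, pvNorm, h]

theorem pvMapIdx_congr {α β : Type} (l : List α) (f g : Nat → α → β)
    (h : ∀ (j : Nat) (hj : j < l.length), f j l[j] = g j l[j]) :
    l.mapIdx f = l.mapIdx g := by
  apply List.ext_getElem
  · simp
  · intro j h1 h2
    simpa using h j (by simpa using h1)

-- A's inner flip pass over range(a, b) as a mapIdx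
theorem pvInner_foldl_eq (st : List String) (a b : Int) (h0 : 0 ≤ a) (hb : b ≤ (st.length : Int)) :
    (PySem.List.pyRange a b 1).foldl
      (fun st j => PySem.List.pySetD st j (pvFlip (PySem.List.pyGetD st j ""))) st
    = st.mapIdx (fun j c => if a ≤ (j : Int) ∧ (j : Int) < b then pvFlip c else c) := by
  by_cases hab : b ≤ a
  · rw [PySem.List.pyRange_one_eq_nil hab]
    apply List.ext_getElem
    · simp
    · intro j h1 h2
      simp only [List.foldl_nil, List.getElem_mapIdx]
      rw [if_neg (by omega)]
  · rw [not_le] at hab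
    have hcnt : (b - a).toNat = (b - (a + 1)).toNat + 1 := by omega
    rw [PySem.List.pyRange_one_cons hab, List.foldl_cons]
    have hget : PySem.List.pyGetD st a "" = st[a.toNat]'(by omega) :=
      PySem.List.pyGetD_eq_getElem st "" (h0 := h0) (h1 := by omega)
    have hset : PySem.List.pySetD st a (pvFlip (PySem.List.pyGetD st a "")) =
        st.set a.toNat (pvFlip (st[a.toNat]'(by omega))) := by
      rw [hget, PySem.List.pySetD_of_nonneg st _ h0]
    rw [hset]
    rw [pvInner_foldl_eq (st.set a.toNat (pvFlip (st[a.toNat]'(by omega)))) (a + 1) b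
      (by omega) (by simpa using hb)]
    apply List.ext_getElem
    · simp
    · intro j h1 h2
      simp only [List.length_mapIdx, List.length_set] at h1 h2
      simp only [List.getElem_mapIdx, List.getElem_set]
      by_cases hja : a.toNat = j
      · subst hja
        rw [if_pos rfl, if_neg (by omega), if_pos (by omega)]
      · rw [if_neg hja]
        by_cases hc : a + 1 ≤ (j : Int) ∧ (j : Int) < b
        · rw [if_pos hc, if_pos (by omega)]
        · rw [if_neg hc, if_neg (by omega)]
termination_by (b - a).toNat
decreasing_by omega

theorem pvInnerA_eq (st : List String) (i K : Int) (h0 : 0 ≤ i) (hb : i + K ≤ (st.length : Int)) :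
    pvInnerA st i K
    = st.mapIdx (fun j c => if i ≤ (j : Int) ∧ (j : Int) < i + K then pvFlip c else c) := by
  exact pvInner_foldl_eq st i (i + K) h0 hb

theorem pvMapIdx_mapIdx {α β γ : Type} (l : List α) (f : Nat → α → β) (g : Nat → β → γ) :
    (l.mapIdx f).mapIdx g = l.mapIdx (fun j c => g j (f j c)) := by
  apply List.ext_getElem <;> simp

-- step 1 of A's body produces A's snapshot
theorem pvStep1 (stack : List String) (K i : Int) (hK : 0 < K) (h0 : 0 ≤ i)
    (hb : i + K ≤ (stack.length : Int)) :
    pvInnerA (pvStateA stack K i) i K = pvSnapA stack K i := by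
  rw [pvInnerA_eq _ i K h0 (by simpa [pvStateA] using hb), pvStateA, pvMapIdx_mapIdx, pvSnapA]
  apply pvMapIdx_congr
  intro j hj
  by_cases h1 : i ≤ (j : Int) ∧ (j : Int) < i + K
  · rw [if_pos h1, if_pos h1]
    by_cases h2 : (j : Int) < i + K - 1 ∧ 1 ≤ i
    · rw [if_pos h2, pvFlip_norm]
    · rw [if_neg h2]
  · rw [if_neg h1, if_neg h1]
    by_cases h2 : (j : Int) < i + K - 1 ∧ 1 ≤ i
    · rw [if_pos h2, if_pos (by omega)]
    · rw [if_neg h2, if_neg (by omega)]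

-- step 2 of A's body (the revert pass) advances the live stack
theorem pvStep2 (stack : List String) (K i : Int) (hK : 0 < K) (h0 : 0 ≤ i)
    (hb : i + K ≤ (stack.length : Int)) :
    pvInnerA (pvSnapA stack K i) i K = pvStateA stack K (i + 1) := by
  rw [pvInnerA_eq _ i K h0 (by simpa [pvSnapA] using hb), pvSnapA, pvMapIdx_mapIdx, pvStateA]
  apply pvMapIdx_congr
  intro j hj
  by_cases h1 : i ≤ (j : Int) ∧ (j : Int) < i + K
  · rw [if_pos h1, if_pos h1, pvFlip_flip, if_pos (by omega)]
  · rw [if_neg h1, if_neg h1]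
    by_cases h2 : (j : Int) < i ∧ 0 < K
    · rw [if_pos h2, if_pos (by omega)]
    · rw [if_neg h2, if_neg (by omega)]

-- A's outer loop, unrolled from start index a with the live stack pvStateA stack K a
theorem pvOuterA (stack : List String) (K : Int) (hK : 0 < K) :
    ∀ (a : Int) (fl : List (List String)), 0 ≤ a →
    ((PySem.List.pyRange a ((stack.length : Int) - K + 1) 1).foldl
      (fun (acc : List (List String) × List String) i =>
        let st1 := pvInnerA acc.2 i K
        (acc.1 ++ [st1], pvInnerA st1 i K)) (fl, pvStateA stack K a)).1
    = fl ++ (PySem.List.pyRange a ((stack.length : Int) - K + 1) 1).map (pvSnapA stack K) := by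
  intro a fl h0
  by_cases hab : (stack.length : Int) - K + 1 ≤ a
  · rw [PySem.List.pyRange_one_eq_nil hab]; simp
  · rw [not_le] at hab
    rw [PySem.List.pyRange_one_cons hab, List.foldl_cons, List.map_cons]
    have hb : a + K ≤ (stack.length : Int) := by omega
    simp only [pvStep1 stack K a hK h0 hb, pvStep2 stack K a hK h0 hb]
    rw [pvOuterA stack K hK (a + 1) (fl ++ [pvSnapA stack K a]) (by omega)]
    simp
termination_by a => ((stack.length : Int) - K + 1 - a).toNat
decreasing_by omega

theorem pvStateA_zero (stack : List String) (K : Int) : pvStateA stack K 0 = stack := by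
  apply List.ext_getElem
  · simp [pvStateA]
  · intro j h1 h2
    simp only [pvStateA, List.getElem_mapIdx]
    rw [if_neg (by omega)]

-- A's result as a map of snapshots, for 0 < K
theorem pvAEq (stack : List String) (K : Int) (hK : 0 < K) :
    get_all_flips stack K
    = (PySem.List.pyRange 0 ((stack.length : Int) - K + 1) 1).map (pvSnapA stack K) := by
  unfold get_all_flips
  have h := pvOuterA stack K hK 0 [] (by omega)
  rw [pvStateA_zero] at h
  simpa using h

-- the flipped prefix glued to the raw suffix, as a mapIdx
theorem pvConcatEq {α : Type} (xs : List α) (f : α → α) (a k : Nat) (h : a + k ≤ xs.length) :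
    xs.take a ++ ((xs.drop a).take k).map f ++ xs.drop (a + k)
    = xs.mapIdx (fun j c => if a ≤ j ∧ j < a + k then f c else c) := by
  apply List.ext_getElem
  · simp; omega
  · intro j h1 h2
    simp only [List.length_mapIdx] at h2
    simp only [List.getElem_mapIdx, List.getElem_append, List.length_append, List.length_take,
      List.length_map, List.length_drop]
    by_cases hj1 : j < a
    · rw [dif_pos (by omega), dif_pos (by omega)]
      simp only [List.getElem_take]
      rw [if_neg (by omega)]
    · by_cases hj2 : j < a + k
      · rw [dif_pos (by omega), dif_neg (by omega)]
        simp only [List.getElem_map, List.getElem_take, List.getElem_drop]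
        rw [if_pos (by omega)]
        congr 2
        omega
      · rw [dif_neg (by omega)]
        simp only [List.getElem_drop]
        rw [if_neg (by omega)]
        congr 1
        omega

-- B's initial working copy is A's first snapshot
theorem pvCur0 (stack : List String) (K : Int) (hK : 1 ≤ K) (hn : K ≤ (stack.length : Int)) :
    (PySem.List.slice stack none (some K)).map (fun c => if c == "-" then "+" else "-")
      ++ PySem.List.slice stack (some K) none
    = pvSnapA stack K 0 := by
  rw [PySem.List.slice_to stack (by omega : (0 : Int) ≤ K),
    PySem.List.slice_from stack (by omega : (0 : Int) ≤ K)]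
  have hc := pvConcatEq stack (fun c => if c == "-" then "+" else "-") 0 K.toNat (by omega)
  simp only [List.take_zero, List.drop_zero, List.nil_append, Nat.zero_add] at hc
  rw [hc]
  unfold pvSnapA
  apply pvMapIdx_congr
  intro j hj
  by_cases h : j < K.toNat
  · rw [if_pos (show 0 ≤ j ∧ j < K.toNat from ⟨Nat.zero_le j, h⟩),
      if_pos (show (0 : Int) ≤ (j : Int) ∧ (j : Int) < 0 + K by omega)]
    rfl
  · rw [if_neg (show ¬(0 ≤ j ∧ j < K.toNat) by omega),
      if_neg (show ¬((0 : Int) ≤ (j : Int) ∧ (j : Int) < 0 + K) by omega),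
      if_neg (show ¬((j : Int) < 0 ∧ 0 < K) by omega)]

-- one pySetD of the flipped current entry, as List.set
theorem pvSetGetFlip (l : List String) (a : Int) (h0 : 0 ≤ a) (h1 : a < (l.length : Int)) :
    PySem.List.pySetD l a (if (PySem.List.pyGetD l a "") == "-" then "+" else "-")
    = l.set a.toNat (pvFlip (l[a.toNat]'(by omega))) := by
  rw [PySem.List.pyGetD_eq_getElem l "" (h0 := h0) (h1 := h1),
    PySem.List.pySetD_of_nonneg l _ h0]
  rfl

-- B's two boundary flips advance A's snapshot by one window position
theorem pvStepB (stack : List String) (K i : Int) (hK : 1 ≤ K) (h1 : 1 ≤ i)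
    (hb : i + K ≤ (stack.length : Int)) :
    PySem.List.pySetD
      (PySem.List.pySetD (pvSnapA stack K (i - 1)) (i - 1)
        (if (PySem.List.pyGetD (pvSnapA stack K (i - 1)) (i - 1) "") == "-" then "+" else "-"))
      (i + K - 1)
      (if (PySem.List.pyGetD
            (PySem.List.pySetD (pvSnapA stack K (i - 1)) (i - 1)
              (if (PySem.List.pyGetD (pvSnapA stack K (i - 1)) (i - 1) "") == "-" then "+" else "-"))
            (i + K - 1) "") == "-" then "+" else "-")
    = pvSnapA stack K i := by
  have hL : (pvSnapA stack K (i - 1)).length = stack.length := by simp [pvSnapA]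
  rw [pvSetGetFlip (pvSnapA stack K (i - 1)) (i - 1) (by omega) (by omega)]
  rw [pvSetGetFlip _ (i + K - 1) (by omega)
    (by simp only [List.length_set, hL]; omega)]
  rw [List.getElem_set_ne (by omega)]
  apply List.ext_getElem
  · simp [pvSnapA]
  · intro j hj1 hj2
    simp only [List.length_set, hL] at hj1
    simp only [pvSnapA, List.length_mapIdx] at hj2
    simp only [List.getElem_set, pvSnapA, List.getElem_mapIdx]
    by_cases hm2 : (i + K - 1).toNat = j
    · rw [if_pos hm2,
        if_neg (show ¬(i - 1 ≤ ((i + K - 1).toNat : Int) ∧ ((i + K - 1).toNat : Int) < i - 1 + K) by omega),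
        if_neg (show ¬(((i + K - 1).toNat : Int) < i - 1 ∧ 0 < K) by omega),
        if_pos (show i ≤ (j : Int) ∧ (j : Int) < i + K by omega)]
      simp only [hm2]
    · rw [if_neg hm2]
      by_cases hm1 : (i - 1).toNat = j
      · rw [if_pos hm1,
          if_pos (show i - 1 ≤ ((i - 1).toNat : Int) ∧ ((i - 1).toNat : Int) < i - 1 + K by omega),
          pvFlip_flip,
          if_neg (show ¬(i ≤ (j : Int) ∧ (j : Int) < i + K) by omega),
          if_pos (show (j : Int) < i ∧ 0 < K by omega)]
        simp only [hm1]
      · rw [if_neg hm1]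
        by_cases hc1 : i - 1 ≤ (j : Int) ∧ (j : Int) < i - 1 + K
        · rw [if_pos hc1, if_pos (show i ≤ (j : Int) ∧ (j : Int) < i + K by omega)]
        · rw [if_neg hc1]
          by_cases hc2 : (j : Int) < i - 1 ∧ 0 < K
          · rw [if_pos hc2,
              if_neg (show ¬(i ≤ (j : Int) ∧ (j : Int) < i + K) by omega),
              if_pos (show (j : Int) < i ∧ 0 < K by omega)]
          · rw [if_neg hc2,
              if_neg (show ¬(i ≤ (j : Int) ∧ (j : Int) < i + K) by omega),
              if_neg (show ¬((j : Int) < i ∧ 0 < K) by omega)]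

-- B's sliding loop, unrolled from window start a with working copy pvSnapA stack K (a-1)
theorem pvOuterB (stack : List String) (K : Int) (hK : 1 ≤ K) :
    ∀ (a : Int) (fl : List (List String)), 1 ≤ a →
    ((PySem.List.pyRange a ((stack.length : Int) - K + 1) 1).foldl
      (fun (acc : List (List String) × List String) i =>
        let c1 := PySem.List.pySetD acc.2 (i - 1)
          (if (PySem.List.pyGetD acc.2 (i - 1) "") == "-" then "+" else "-")
        let c2 := PySem.List.pySetD c1 (i + K - 1)
          (if (PySem.List.pyGetD c1 (i + K - 1) "") == "-" then "+" else "-")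
        (acc.1 ++ [c2], c2)) (fl, pvSnapA stack K (a - 1))).1
    = fl ++ (PySem.List.pyRange a ((stack.length : Int) - K + 1) 1).map (pvSnapA stack K) := by
  intro a fl ha
  by_cases hab : (stack.length : Int) - K + 1 ≤ a
  · rw [PySem.List.pyRange_one_eq_nil hab]; simp
  · rw [not_le] at hab
    rw [PySem.List.pyRange_one_cons hab, List.foldl_cons, List.map_cons]
    have hstep := pvStepB stack K a hK ha (by omega)
    simp only [hstep]
    have h := pvOuterB stack K hK (a + 1) (fl ++ [pvSnapA stack K a]) (by omega)
    rw [show a + 1 - 1 = a from by omega] at h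
    rw [h]
    simp
termination_by a => ((stack.length : Int) - K + 1 - a).toNat
decreasing_by omega

-- ===== VERDICT (by name: the statement is the Claim_ definition above) =====
theorem get_all_flips_spec : Claim_equal_get_all_flips := by
  intro stack K _ hPre
  unfold Pre_get_all_flips at hPre
  unfold Spec_get_all_flips
  rw [pvAEq stack K (by omega)]
  simp only [get_all_flips_alt]
  by_cases hg : (stack.length : Int) - K + 1 ≤ 0
  · rw [if_pos hg, PySem.List.pyRange_one_eq_nil hg]
    simp
  · rw [if_neg hg]
    have hn : K ≤ (stack.length : Int) := by omega
    rw [pvCur0 stack K hPre hn]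
    have h := pvOuterB stack K hPre 1 [pvSnapA stack K 0] (le_refl 1)
    rw [show (1 : Int) - 1 = 0 from by omega] at h
    rw [h]
    rw [PySem.List.pyRange_one_cons (by omega : (0 : Int) < (stack.length : Int) - K + 1),
      List.map_cons, show (0 : Int) + 1 = 1 from by omega]
    simp
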